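-- pv_equiv track=rewrite | github.com/yourwayisright/course_python | homework_16.py | consistent_string
-- ===== SOURCE A (Python) =====
-- def consistent_string(strings, allowed):
--     """
--     Дан список строк strings, и строка allowed, которая состоит из уникальных символов.
--     Реализуйте функцию, которая из списка строк strings отфильтрует только те, которые состоят из символов
--     содержащихся в allowed и не содержат других символов. Нужное вернуть множество(set) из нужных строк.
--     """
--
--     result = set()
--     for string in strings:
--         is_consistent = True
--         for symbol in string:
--             if symbol not in allowed:
--                 is_consistent = False
--         if is_consistent:
--             result.add(string)
--     return result
-- ===== SOURCE B (Python) =====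
-- def consistent_string(strings, allowed):
--     result = set()
--     for s in strings:
--         t = s
--         for c in set(s):
--             if c in allowed:
--                 t = t.replace(c, '')
--         if not t:
--             result.add(s)
--     return result
-- ===== Notes on version B (the rewrite author's own statement) =====
-- stated objective: alternative
-- what changed: Instead of scanning each string's characters with a boolean membership flag, B deletes each allowed distinct character of the string via str.replace and keeps the string iff the residue is empty.
import Mathlib
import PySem

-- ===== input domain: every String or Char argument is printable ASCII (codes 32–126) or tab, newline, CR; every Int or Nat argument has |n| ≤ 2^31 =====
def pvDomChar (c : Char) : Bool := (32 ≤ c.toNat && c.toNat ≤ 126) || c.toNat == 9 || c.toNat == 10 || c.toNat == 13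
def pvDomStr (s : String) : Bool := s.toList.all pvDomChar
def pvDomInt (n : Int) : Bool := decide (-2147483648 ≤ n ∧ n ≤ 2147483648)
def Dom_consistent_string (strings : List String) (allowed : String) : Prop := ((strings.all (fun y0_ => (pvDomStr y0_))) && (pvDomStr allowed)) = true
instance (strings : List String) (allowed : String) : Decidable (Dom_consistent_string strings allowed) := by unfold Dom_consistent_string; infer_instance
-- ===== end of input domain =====

-- B replaces A's per-character membership scan with a flag by character DELETION:
-- each allowed distinct character of the string is removed via str.replace, and the
-- string is kept iff the residue is empty (alternative algorithm; same behaviour).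


-- ===== PORT A =====
-- 'symbol not in allowed' for a single character is exactly char membership in allowed's chars
def consistent_string (strings : List String) (allowed : String) : List String :=
  strings.foldl (fun result string =>
    let is_consistent := string.toList.foldl
      (fun is_consistent symbol =>
        if ¬ allowed.toList.contains symbol then false else is_consistent) true
    if is_consistent then PySem.Set.add result string else result) []

-- ===== PORT B =====
-- 'c in allowed' for a single character c is exactly char membership in allowed's chars;
-- 'set(s)' is PySem.Set.ofList over s's chars (deletions commute, so iteration order is immaterial)
def consistent_string_alt (strings : List String) (allowed : String) : List String :=
  strings.foldl (fun result s =>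
    let t := (PySem.Set.ofList s.toList).foldl
      (fun t c =>
        if allowed.toList.contains c then PySem.Str.replace t (String.ofList [c]) "" else t) s
    if t = "" then PySem.Set.add result s else result) []

-- ===== PRECONDITION & SPEC =====
def Spec_consistent_string (strings : List String) (allowed : String) (out : List String) : Prop := out = consistent_string_alt strings allowed
instance (strings : List String) (allowed : String) (out : List String) : Decidable (Spec_consistent_string strings allowed out) := by unfold Spec_consistent_string; infer_instance

-- ===== CLAIM (what is proved, stated in full; the proofs are below) =====
def Claim_equal_consistent_string : Prop := ∀ (strings : List String) (allowed : String), Dom_consistent_string strings allowed → Spec_consistent_string strings allowed (consistent_string strings allowed)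

-- ===== LEMMAS AND PROOFS =====

-- A's inner flag loop computes "all characters allowed"
theorem flag_eq_all (cs al : List Char) (b : Bool) :
    cs.foldl (fun is_consistent symbol =>
      if ¬ al.contains symbol then false else is_consistent) b
    = (b && cs.all (fun c => al.contains c)) := by
  induction cs generalizing b with
  | nil => simp
  | cons c cs ih =>
    simp only [List.foldl_cons, List.all_cons, ih]
    by_cases h : al.contains c <;> simp_all

-- deleting one character = filtering it out (replace.go with enough fuel)
theorem replace_go_single (c : Char) (fuel : Nat) (l acc : List Char) (h : l.length ≤ fuel) :
    PySem.Chars.replace.go [c] [] fuel l acc = acc.reverse ++ l.filter (fun x => x != c) := by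
  induction fuel generalizing l acc with
  | zero =>
    interval_cases hl : l.length
    simp_all [PySem.Chars.replace.go, List.length_eq_zero_iff.mp hl]
  | succ fuel ih =>
    cases l with
    | nil => simp [PySem.Chars.replace.go]
    | cons x t =>
      rw [PySem.Chars.replace.go]
      by_cases hx : x = c
      · subst hx
        simp only [List.isPrefixOf, beq_self_eq_true, Bool.true_and,
          if_true, List.length_cons, List.length_nil, List.reverse_nil, List.nil_append,
          List.drop_succ_cons, List.drop_zero]
        rw [ih t acc (by simp at h; omega)]
        simp
      · have : ([c].isPrefixOf (x :: t)) = false := by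
          simp [List.isPrefixOf, Ne.symm hx]
        rw [this]
        simp only [Bool.false_eq_true, if_false]
        rw [ih t (x :: acc) (by simpa using Nat.le_of_succ_le_succ (by simpa using h))]
        simp [hx]

theorem replace_single (c : Char) (l : List Char) :
    PySem.Chars.replace l [c] [] = l.filter (fun x => x != c) := by
  rw [PySem.Chars.replace]
  simp only [List.isEmpty_cons, Bool.false_eq_true, if_false]
  exact replace_go_single c l.length l [] le_rfl

-- B's deletion loop, seen on the character-list side: it filters out exactly the
-- characters that are both in ds and allowed
theorem fold_delete_toList (al ds : List Char) (s : String) :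
    (ds.foldl (fun t c =>
        if al.contains c then PySem.Str.replace t (String.ofList [c]) "" else t) s).toList
    = ds.foldl (fun t c => if al.contains c then t.filter (fun x => x != c) else t) s.toList := by
  induction ds generalizing s with
  | nil => rfl
  | cons c ds ih =>
    simp only [List.foldl_cons]
    by_cases h : al.contains c
    · rw [if_pos h, if_pos h, ih]
      congr 1
      rw [PySem.Str.toList_replace]
      simpa using replace_single c s.toList
    · rw [if_neg h, if_neg h, ih]

theorem fold_delete_filter (al ds cs : List Char) :
    ds.foldl (fun t c => if al.contains c then t.filter (fun x => x != c) else t) cs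
    = cs.filter (fun x => !(ds.contains x && al.contains x)) := by
  induction ds generalizing cs with
  | nil => simp
  | cons c ds ih =>
    simp only [List.foldl_cons]
    by_cases h : al.contains c
    · rw [if_pos h, ih, List.filter_filter]
      congr 1
      funext x
      by_cases hx : x = c <;> simp_all
    · rw [if_neg h, ih]
      congr 1
      funext x
      by_cases hx : x = c <;> simp_all

-- B's residue is empty iff every character of s is allowed
theorem residue_empty_iff (al : List Char) (s : String) :
    (((PySem.Set.ofList s.toList).foldl (fun t c =>
        if al.contains c then PySem.Str.replace t (String.ofList [c]) "" else t) s) = "")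
    = (s.toList.all (fun x => al.contains x) = true) := by
  have h : ∀ u : String, u = "" ↔ u.toList = [] := by
    intro u
    constructor
    · intro h; rw [h]; rfl
    · intro h
      have := congrArg String.ofList h
      simpa using this
  rw [eq_iff_iff, h, fold_delete_toList, fold_delete_filter]
  simp only [List.filter_eq_nil_iff, List.all_eq_true]
  constructor
  · intro hh x hx
    have h2 := hh x hx
    simp at h2
    simpa using h2.2
  · intro hh x hx
    simp
    exact ⟨hx, by simpa using hh x hx⟩

-- ===== VERDICT (by name: the statement is the Claim_ definition above) =====
theorem consistent_string_spec : Claim_equal_consistent_string := by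
  intro strings allowed _
  unfold Spec_consistent_string consistent_string consistent_string_alt
  apply PySem.List.foldl_congr_mem
  intro r s _
  simp only [flag_eq_all, Bool.true_and]
  by_cases h : s.toList.all (fun c => allowed.toList.contains c) = true
  · rw [if_pos h, if_pos (by rw [residue_empty_iff]; exact h)]
  · rw [if_neg (by simpa using h), if_neg (by rw [residue_empty_iff]; exact h)]
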